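-- pv_equiv track=rewrite | github.com/Hugovveen/Software-engineering-final | game/map/layout_generator.py | compact_platform_runs
-- ===== SOURCE A (Python) =====
-- TILE_SIZE = 64
--
-- PLATFORM_TILE = "@"
--
-- def compact_platform_runs(
--     board_rows: tuple[str, ...],
--     tile_size: int = TILE_SIZE,
--     platform_tile: str = PLATFORM_TILE,
-- ) -> list[tuple[int, int, int, int]]:
--     """Convert contiguous platform tiles into world-space rectangles."""
--     platforms: list[tuple[int, int, int, int]] = []
--
--     for row_index, row in enumerate(board_rows):
--         col = 0
--         while col < len(row):
--             if row[col] != platform_tile: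
--                 col += 1
--                 continue
--
--             run_start = col
--             while col < len(row) and row[col] == platform_tile:
--                 col += 1
--             run_end = col
--
--             x = run_start * tile_size
--             y = row_index * tile_size
--             width = (run_end - run_start) * tile_size
--             height = tile_size
--             platforms.append((x, y, width, height))
--
--     return platforms
-- ===== SOURCE B (Python) =====
-- TILE_SIZE = 64
--
-- PLATFORM_TILE = "@"
--
-- def compact_platform_runs(
--     board_rows,
--     tile_size=TILE_SIZE,
--     platform_tile=PLATFORM_TILE,
-- ):
--     """Boundary detection: per row, compute run starts and run ends as two
--     neighbour-comparison filters over a precomputed mask, then pair them with zip."""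
--     rects = []
--     for y, row in enumerate(board_rows):
--         is_p = [ch == platform_tile for ch in row]
--         starts = [i for i, (cur, prv) in enumerate(zip(is_p, [False] + is_p)) if cur and not prv]
--         ends = [i + 1 for i, (cur, nxt) in enumerate(zip(is_p, is_p[1:] + [False])) if cur and not nxt]
--         rects.extend((s * tile_size, y * tile_size, (e - s) * tile_size, tile_size)
--                      for s, e in zip(starts, ends))
--     return rects
-- ===== Notes on version B (the rewrite author's own statement) =====
-- stated objective: alternative
-- what changed: Replaces A's stateful two-pointer scan with a stateless boundary-detection pipeline: a boolean mask per row, two neighbour-comparison filters computing run-start and run-end indices, and a zip pairing them into rectangles.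
import Mathlib
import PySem

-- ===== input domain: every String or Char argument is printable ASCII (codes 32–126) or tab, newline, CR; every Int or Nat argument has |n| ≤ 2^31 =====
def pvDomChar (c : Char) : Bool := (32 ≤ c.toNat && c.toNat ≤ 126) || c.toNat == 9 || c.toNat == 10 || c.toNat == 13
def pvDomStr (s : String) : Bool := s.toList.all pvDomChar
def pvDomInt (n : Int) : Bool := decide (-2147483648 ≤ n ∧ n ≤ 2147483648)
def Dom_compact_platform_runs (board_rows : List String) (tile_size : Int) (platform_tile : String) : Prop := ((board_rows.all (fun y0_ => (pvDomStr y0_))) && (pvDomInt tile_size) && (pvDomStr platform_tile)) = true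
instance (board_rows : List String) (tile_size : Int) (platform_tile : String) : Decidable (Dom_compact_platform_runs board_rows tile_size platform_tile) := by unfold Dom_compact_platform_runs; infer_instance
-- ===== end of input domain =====

-- B replaces A's stateful two-pointer scan with a stateless boundary-detection pipeline
-- (mask, start/end neighbour filters, zip); objective: alternative, same cost; return
-- values proved equal everywhere.

-- shared: Python's `row[col] == platform_tile` compares a one-character string with the tile string
def pMatch (tile : String) (c : Char) : Bool := tile.toList == [c]

-- ===== PORT A =====
-- inner `while col < len(row) and row[col] == platform_tile: col += 1`
def innerA (row : List Char) (tile : String) (col : Nat) : Nat :=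
  if h : col < row.length then
    if pMatch tile row[col] then innerA row tile (col + 1) else col
  else col
termination_by row.length - col

-- termination helpers for the outer loop (cited by decreasing_by)
theorem innerA_ge (row : List Char) (tile : String) (col : Nat) :
    col ≤ innerA row tile col := by
  unfold innerA
  split
  · split
    · have := innerA_ge row tile (col + 1); omega
    · exact le_refl _
  · exact le_refl _
termination_by row.length - col

theorem innerA_gt (row : List Char) (tile : String) (col : Nat)
    (h : col < row.length) (hm : pMatch tile row[col] = true) :
    col < innerA row tile col := by
  rw [innerA]
  simp only [dif_pos h, if_pos hm]
  have := innerA_ge row tile (col + 1); omega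

-- outer `while col < len(row): …`
def outerA (row : List Char) (tile : String) (ts y : Int) (col : Nat)
    (acc : List (Int × Int × Int × Int)) : List (Int × Int × Int × Int) :=
  if h : col < row.length then
    if pMatch tile row[col] = false then
      outerA row tile ts y (col + 1) acc
    else
      let e := innerA row tile col
      outerA row tile ts y e
        (acc ++ [((col : Int) * ts, y * ts, ((e : Int) - (col : Int)) * ts, ts)])
  else acc
termination_by row.length - col
decreasing_by
  · omega
  · have hm : pMatch tile row[col] = true := by
      rename_i h2; revert h2; simp
    have := innerA_gt row tile col h hm; omega

def compact_platform_runs (board_rows : List String) (tile_size : Int) (platform_tile : String) : List (Int × Int × Int × Int) :=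
  (PySem.List.enumerate board_rows 0).foldl
    (fun acc p => outerA p.2.toList platform_tile tile_size p.1 0 acc) []

-- ===== PORT B =====
-- per row: boolean mask, start indices (cur ∧ ¬prev), end indices (cur ∧ ¬next), zip into rects
def rowB (row : List Char) (tile : String) (ts y : Int) : List (Int × Int × Int × Int) :=
  let isp := row.map (fun ch => pMatch tile ch)
  let starts := ((PySem.List.enumerate (isp.zip (false :: isp)) 0).filter
      (fun p => p.2.1 && !p.2.2)).map (fun p => p.1)
  let ends := ((PySem.List.enumerate (isp.zip (isp.tail ++ [false])) 0).filter
      (fun p => p.2.1 && !p.2.2)).map (fun p => p.1 + 1)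
  (starts.zip ends).map (fun p => (p.1 * ts, y * ts, (p.2 - p.1) * ts, ts))

def compact_platform_runs_alt (board_rows : List String) (tile_size : Int) (platform_tile : String) : List (Int × Int × Int × Int) :=
  (PySem.List.enumerate board_rows 0).foldl
    (fun acc p => acc ++ rowB p.2.toList platform_tile tile_size p.1) []

-- ===== PRECONDITION & SPEC =====
def Spec_compact_platform_runs (board_rows : List String) (tile_size : Int) (platform_tile : String) (out : List (Int × Int × Int × Int)) : Prop := out = compact_platform_runs_alt board_rows tile_size platform_tile
instance (board_rows : List String) (tile_size : Int) (platform_tile : String) (out : List (Int × Int × Int × Int)) : Decidable (Spec_compact_platform_runs board_rows tile_size platform_tile out) := by unfold Spec_compact_platform_runs; infer_instance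

-- ===== CLAIM (what is proved, stated in full; the proofs are below) =====
def Claim_equal_compact_platform_runs : Prop := ∀ (board_rows : List String) (tile_size : Int) (platform_tile : String), Dom_compact_platform_runs board_rows tile_size platform_tile → Spec_compact_platform_runs board_rows tile_size platform_tile (compact_platform_runs board_rows tile_size platform_tile)

-- ===== LEMMAS AND PROOFS =====

-- proof-only state machine A's row loop is reduced to
def sm (tile : String) (ts y : Int) : List Char → Nat → Int → List (Int × Int × Int × Int)
  | [], pos, run =>
      if run ≠ 0 then [(((pos : Int) - run) * ts, y * ts, run * ts, ts)] else []
  | c :: rest, pos, run =>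
      if pMatch tile c then sm tile ts y rest (pos + 1) (run + 1)
      else if run ≠ 0 then
        (((pos : Int) - run) * ts, y * ts, run * ts, ts) :: sm tile ts y rest (pos + 1) 0
      else sm tile ts y rest (pos + 1) 0

theorem innerA_eq (row : List Char) (tile : String) (col : Nat) (hcol : col ≤ row.length) :
    innerA row tile col = col + ((row.drop col).takeWhile (pMatch tile)).length := by
  rw [innerA]
  by_cases h : col < row.length
  · rw [dif_pos h]
    rw [List.drop_eq_getElem_cons h]
    by_cases hm : pMatch tile row[col] = true
    · rw [if_pos hm, List.takeWhile_cons_of_pos hm,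
        innerA_eq row tile (col + 1) (by omega)]
      simp; omega
    · rw [if_neg hm, List.takeWhile_cons_of_neg (by simpa using hm)]
      simp
  · rw [dif_neg h]
    have : row.drop col = [] := List.drop_eq_nil_of_le (by omega)
    simp [this]
termination_by row.length - col

theorem sm_general (tile : String) (ts y : Int) : ∀ (l : List Char) (pos k : Nat),
    k + (l.takeWhile (pMatch tile)).length ≠ 0 →
    sm tile ts y l pos (k : Int) =
      (((pos : Int) - (k : Int)) * ts, y * ts,
        ((k : Int) + ((l.takeWhile (pMatch tile)).length : Int)) * ts, ts) ::
      sm tile ts y (l.drop (l.takeWhile (pMatch tile)).length)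
        (pos + (l.takeWhile (pMatch tile)).length) 0 := by
  intro l
  induction l with
  | nil =>
    intro pos k hk
    simp at hk
    simp [sm, hk]
  | cons c rest ih =>
    intro pos k hk
    by_cases hm : pMatch tile c = true
    · rw [List.takeWhile_cons_of_pos hm] at hk ⊢
      have h1 : ((k : Int) + 1) = ((k + 1 : Nat) : Int) := by push_cast; ring
      rw [sm, if_pos hm, h1, ih (pos + 1) (k + 1) (by omega)]
      simp only [List.length_cons, List.drop_succ_cons]
      congr 2
      · push_cast; ring
      · congr 1
        push_cast; ring_nf
      · omega
    · rw [List.takeWhile_cons_of_neg (by simpa using hm)] at hk ⊢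
      have hk0 : k ≠ 0 := by simpa using hk
      rw [sm, if_neg (by simpa using hm), if_pos (by exact_mod_cast hk0)]
      simp [sm, hm]

theorem outerA_eq_sm (row : List Char) (tile : String) (ts y : Int) :
    ∀ (n col : Nat) (acc : List (Int × Int × Int × Int)), row.length - col ≤ n →
    outerA row tile ts y col acc = acc ++ sm tile ts y (row.drop col) col 0 := by
  intro n
  induction n with
  | zero =>
    intro col acc hn
    have h : ¬ col < row.length := by omega
    rw [outerA, dif_neg h]
    have : row.drop col = [] := List.drop_eq_nil_of_le (by omega)
    simp [this, sm]
  | succ m ih =>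
    intro col acc hn
    rw [outerA]
    by_cases h : col < row.length
    · rw [dif_pos h]
      have hdrop : row.drop col = row[col] :: row.drop (col + 1) :=
        List.drop_eq_getElem_cons h
      by_cases hm : pMatch tile row[col] = true
      · rw [if_neg (by simp [hm])]
        have hin : innerA row tile col =
            col + ((row.drop col).takeWhile (pMatch tile)).length :=
          innerA_eq row tile col (by omega)
        set L := ((row.drop col).takeWhile (pMatch tile)).length with hL
        have hL1 : 1 ≤ L := by
          rw [hL, hdrop, List.takeWhile_cons_of_pos hm]
          simp
        have hLle : L ≤ row.length - col := by
          have h2 : L ≤ (row.drop col).length :=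
            (List.takeWhile_sublist (pMatch tile)).length_le
          simp at h2; omega
        rw [ih (innerA row tile col) _ (by omega)]
        have hsg := sm_general tile ts y (row.drop col) col 0 (by omega)
        push_cast at hsg
        rw [hsg, hin]
        push_cast
        simp only [List.append_assoc, List.singleton_append]
        ring_nf
        rw [← hL, List.drop_drop]
      · rw [if_pos (by simpa using hm), ih (col + 1) acc (by omega), hdrop]
        rw [sm, if_neg hm, if_neg (by simp)]
    · rw [dif_neg h]
      have : row.drop col = [] := List.drop_eq_nil_of_le (by omega)
      simp [this, sm]

-- proof-only: run pairs over the boolean mask (pos, run), mirroring sm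
def runsP : List Bool → Int → Int → List (Int × Int)
  | [], pos, run => if run ≠ 0 then [(pos - run, pos)] else []
  | b :: rest, pos, run =>
      if b then runsP rest (pos + 1) (run + 1)
      else if run ≠ 0 then (pos - run, pos) :: runsP rest (pos + 1) 0
      else runsP rest (pos + 1) 0

def rect (ts y : Int) (p : Int × Int) : Int × Int × Int × Int :=
  (p.1 * ts, y * ts, (p.2 - p.1) * ts, ts)

-- structural forms of B's two filters
def Sf : List Bool → Bool → Int → List Int
  | [], _, _ => []
  | b :: rest, prev, i => (if b && !prev then [i] else []) ++ Sf rest b (i + 1)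

def Ef : List Bool → Int → List Int
  | [], _ => []
  | [b], i => if b then [i + 1] else []
  | b :: c :: rest, i => (if b && !c then [i + 1] else []) ++ Ef (c :: rest) (i + 1)

theorem sm_eq_runs (tile : String) (ts y : Int) : ∀ (l : List Char) (pos : Nat) (run : Int),
    sm tile ts y l pos run = (runsP (l.map (pMatch tile)) (pos : Int) run).map (rect ts y) := by
  intro l
  induction l with
  | nil =>
    intro pos run
    by_cases h : run = 0 <;> simp [sm, runsP, rect, h]
  | cons c rest ih =>
    intro pos run
    by_cases hm : pMatch tile c = true
    · rw [sm, if_pos hm]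
      simp only [List.map_cons, hm, runsP]
      rw [ih (pos + 1) (run + 1)]
      push_cast; ring_nf
    · have hm' : pMatch tile c = false := by simpa using hm
      rw [sm, if_neg hm]
      simp only [List.map_cons, runsP, hm', Bool.false_eq_true, if_false]
      split_ifs with h
      · rw [ih (pos + 1) 0]
        simp only [List.map_cons, rect]
        push_cast; ring_nf
      · rw [ih (pos + 1) 0]
        push_cast; ring_nf

theorem Sf_filter (m : List Bool) : ∀ (prev : Bool) (i : Int),
    ((PySem.List.enumerate (m.zip (prev :: m)) i).filter
      (fun p => p.2.1 && !p.2.2)).map (fun p => p.1) = Sf m prev i := by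
  induction m with
  | nil => intro prev i; simp [Sf]
  | cons b rest ih =>
    intro prev i
    rw [List.zip_cons_cons, PySem.List.enumerate_cons, List.filter_cons]
    by_cases h : (b && !prev) = true
    · rw [if_pos (show ((fun (p : Int × Bool × Bool) => p.2.1 && !p.2.2) (i, (b, prev))) = true by simpa using h),
        List.map_cons, ih b (i + 1)]
      simp only [Sf, h, if_true, List.singleton_append]
    · rw [if_neg (show ¬ ((fun (p : Int × Bool × Bool) => p.2.1 && !p.2.2) (i, (b, prev))) = true by simpa using h),
        ih b (i + 1)]
      simp only [Sf, h, Bool.false_eq_true, if_false, List.nil_append]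

theorem Ef_filter : ∀ (m : List Bool) (i : Int),
    ((PySem.List.enumerate (m.zip (m.tail ++ [false])) i).filter
      (fun p => p.2.1 && !p.2.2)).map (fun p => p.1 + 1) = Ef m i := by
  intro m
  induction m with
  | nil => intro i; simp [Ef]
  | cons b rest ih =>
    intro i
    cases rest with
    | nil =>
      by_cases hb : b = true <;>
        simp [Ef, PySem.List.enumerate, PySem.List.enumerate_cons, hb]
    | cons c rest' =>
      rw [show ((b :: c :: rest').tail ++ [false]) = c :: ((c :: rest').tail ++ [false]) by simp,
        List.zip_cons_cons, PySem.List.enumerate_cons, List.filter_cons]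
      by_cases h : (b && !c) = true
      · rw [if_pos (show ((fun (p : Int × Bool × Bool) => p.2.1 && !p.2.2) (i, (b, c))) = true by simpa using h),
          List.map_cons, ih (i + 1)]
        simp only [Ef, h, if_true, List.singleton_append]
      · rw [if_neg (show ¬ ((fun (p : Int × Bool × Bool) => p.2.1 && !p.2.2) (i, (b, c))) = true by simpa using h),
          ih (i + 1)]
        simp only [Ef, h, Bool.false_eq_true, if_false, List.nil_append]

-- run decompositions
theorem Sf_run : ∀ (m : List Bool) (i : Int),
    Sf m true i = Sf (m.drop (m.takeWhile id).length) false (i + (m.takeWhile id).length) := by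
  intro m
  induction m with
  | nil => intro i; simp [Sf]
  | cons b rest ih =>
    intro i
    cases b with
    | true =>
      rw [show (true :: rest).takeWhile id = true :: rest.takeWhile id by simp [List.takeWhile]]
      simp only [List.length_cons, List.drop_succ_cons]
      rw [Sf, ih (i + 1)]
      simp; ring_nf
    | false =>
      rw [show (false :: rest).takeWhile id = [] by simp [List.takeWhile]]
      simp [Sf]

theorem Ef_run : ∀ (m : List Bool) (i : Int), m.head? = some true →
    Ef m i = (i + (m.takeWhile id).length) ::
      Ef (m.drop (m.takeWhile id).length) (i + (m.takeWhile id).length) := by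
  intro m
  induction m with
  | nil => intro i h; simp at h
  | cons b rest ih =>
    intro i h
    have hb : b = true := by simpa using h
    subst hb
    cases rest with
    | nil => simp [Ef, List.takeWhile]
    | cons c rest' =>
      cases c with
      | true =>
        rw [show (true :: true :: rest').takeWhile id
              = true :: (true :: rest').takeWhile id by simp [List.takeWhile]]
        simp only [List.length_cons, List.drop_succ_cons]
        rw [Ef, ih (i + 1) (by simp)]
        simp; constructor <;> ring_nf
      | false =>
        rw [show (true :: false :: rest').takeWhile id = [true] by simp [List.takeWhile]]
        simp [Ef]

theorem runsP_run : ∀ (m : List Bool) (i run : Int), 0 ≤ run →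
    run + ((m.takeWhile id).length : Int) ≠ 0 →
    runsP m i run = (i - run, i + (m.takeWhile id).length) ::
      runsP (m.drop (m.takeWhile id).length) (i + (m.takeWhile id).length) 0 := by
  intro m
  induction m with
  | nil =>
    intro i run h0 hk
    simp only [List.takeWhile_nil, List.length_nil, Nat.cast_zero, add_zero] at hk ⊢
    simp [runsP, hk]
  | cons b rest ih =>
    intro i run h0 hk
    cases b with
    | true =>
      rw [show (true :: rest).takeWhile id = true :: rest.takeWhile id by simp [List.takeWhile]]
      simp only [List.length_cons, List.drop_succ_cons]
      rw [runsP, if_pos rfl, ih (i + 1) (run + 1) (by omega)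
        (by have : (0 : Int) ≤ ((rest.takeWhile id).length : Int) := by positivity
            omega)]
      rw [show i + 1 - (run + 1) = i - run by ring,
        show i + 1 + ((rest.takeWhile id).length : Int)
          = i + (((rest.takeWhile id).length + 1 : Nat) : Int) by push_cast; ring]
    | false =>
      have hk' : run ≠ 0 := by
        rw [show (false :: rest).takeWhile id = [] by simp [List.takeWhile]] at hk
        simpa using hk
      rw [show (false :: rest).takeWhile id = [] by simp [List.takeWhile]]
      simp only [List.length_nil, Nat.cast_zero, add_zero, List.drop_zero]
      rw [runsP, if_neg (by simp), if_pos hk',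
        show runsP (false :: rest) i 0 = runsP rest (i + 1) 0 by rw [runsP]; simp]

theorem zip_eq_runsP (m : List Bool) (i : Int) :
    (Sf m false i).zip (Ef m i) = runsP m i 0 := by
  match m with
  | [] => simp [Sf, Ef, runsP]
  | false :: rest =>
    rw [show Sf (false :: rest) false i = Sf rest false (i + 1) by rw [Sf]; simp,
      show Ef (false :: rest) i = Ef rest (i + 1) by cases rest <;> simp [Ef],
      show runsP (false :: rest) i 0 = runsP rest (i + 1) 0 by rw [runsP]; simp]
    exact zip_eq_runsP rest (i + 1)
  | true :: rest =>
    have ht : (true :: rest).takeWhile id = true :: rest.takeWhile id := by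
      simp [List.takeWhile]
    have hS : Sf (true :: rest) false i
        = i :: Sf (rest.drop (rest.takeWhile id).length) false
            (i + 1 + ((rest.takeWhile id).length : Int)) := by
      rw [Sf, Sf_run rest (i + 1)]
      norm_num
    have hE : Ef (true :: rest) i
        = (i + 1 + ((rest.takeWhile id).length : Int)) ::
          Ef (rest.drop (rest.takeWhile id).length)
            (i + 1 + ((rest.takeWhile id).length : Int)) := by
      rw [Ef_run (true :: rest) i (by simp), ht]
      simp only [List.length_cons, List.drop_succ_cons]
      rw [show i + (((rest.takeWhile id).length + 1 : Nat) : Int)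
        = i + 1 + ((rest.takeWhile id).length : Int) by push_cast; ring]
    have hR : runsP (true :: rest) i 0
        = (i, i + 1 + ((rest.takeWhile id).length : Int)) ::
          runsP (rest.drop (rest.takeWhile id).length)
            (i + 1 + ((rest.takeWhile id).length : Int)) 0 := by
      rw [runsP, if_pos rfl, show (0 : Int) + 1 = 1 by ring,
        runsP_run rest (i + 1) 1 (by omega)
        (by have : (0 : Int) ≤ ((rest.takeWhile id).length : Int) := by positivity
            omega),
        show i + 1 - 1 = i by ring]
    rw [hS, hE, hR, List.zip_cons_cons]
    exact congrArg (List.cons _)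
      (zip_eq_runsP (rest.drop (rest.takeWhile id).length)
        (i + 1 + ((rest.takeWhile id).length : Int)))
termination_by m.length
decreasing_by
  · simp
  · simp

theorem rowB_eq_sm (row : List Char) (tile : String) (ts y : Int) :
    rowB row tile ts y = sm tile ts y row 0 0 := by
  unfold rowB
  dsimp only
  rw [Sf_filter, Ef_filter, zip_eq_runsP, sm_eq_runs]
  simp [rect]

-- ===== VERDICT (by name: the statement is the Claim_ definition above) =====
theorem compact_platform_runs_spec : Claim_equal_compact_platform_runs := by
  intro board_rows ts tile _
  unfold Spec_compact_platform_runs compact_platform_runs compact_platform_runs_alt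
  congr 1
  funext acc p
  rw [rowB_eq_sm, outerA_eq_sm p.2.toList tile ts p.1 p.2.toList.length 0 acc (by omega)]
  simp
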